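-- pv_equiv track=rewrite | github.com/fikriauliya/competitive-programming | Kick Start/src/2022/Round E/coloring-game.py | f
-- ===== SOURCE A (Python) =====
-- def f(n):
--     res = 1
--     turn = 0
--     while n > 2:
--         res += 1
--
--         turn += 1
--         if turn % 2 == 1:
--             # Human
--             n -= 3
--         else:
--             # Computer
--             n -= 2
--
--     return res
-- ===== SOURCE B (Python) =====
-- def f(n):
--     # closed form: number of alternating -3/-2 steps until n <= 2, plus 1
--     if n <= 2:
--         return 1
--     t, r = divmod(n - 2, 5)
--     return 1 + 2 * t + (0 if r == 0 else (1 if r <= 3 else 2))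
-- ===== Notes on version B (the rewrite author's own statement) =====
-- stated objective: faster
-- what changed: Replaced the step-by-step while loop (subtract 3,2,3,2,... counting iterations) with a closed-form computation via divmod(n-2,5).
import Mathlib
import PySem

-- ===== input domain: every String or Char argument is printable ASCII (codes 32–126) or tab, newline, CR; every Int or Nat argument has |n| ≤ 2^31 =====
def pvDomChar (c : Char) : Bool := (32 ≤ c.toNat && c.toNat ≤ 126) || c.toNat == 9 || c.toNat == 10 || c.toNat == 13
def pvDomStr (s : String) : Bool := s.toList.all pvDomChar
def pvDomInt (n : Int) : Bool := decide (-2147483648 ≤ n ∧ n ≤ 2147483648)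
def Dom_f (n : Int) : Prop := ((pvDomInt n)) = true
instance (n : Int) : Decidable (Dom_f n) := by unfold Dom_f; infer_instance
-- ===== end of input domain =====

-- B replaces A's O(n) alternating-subtraction loop by an O(1) closed form (divmod by 5).

-- ===== PORT A =====
-- literal port of A's while loop (state: n, res, turn); terminates since n strictly decreases while n > 2
def fLoop (n res turn : Int) : Int :=
  if h : n > 2 then
    let res := res + 1
    let turn := turn + 1
    if turn % 2 = 1 then fLoop (n - 3) res turn
    else fLoop (n - 2) res turn
  else res
termination_by n.toNat
decreasing_by all_goals omega

def f (n : Int) : Int := fLoop n 1 0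

-- ===== PORT B =====
def f_alt (n : Int) : Int :=
  if n ≤ 2 then 1
  else
    -- divmod(n-2, 5): divisor is the positive literal 5, Python floordiv/mod = Lean / and % here
    let t := (n - 2) / 5
    let r := (n - 2) % 5
    1 + 2 * t + (if r = 0 then 0 else if r ≤ 3 then 1 else 2)

-- ===== PRECONDITION & SPEC =====
def Spec_f (n : Int) (out : Int) : Prop := out = f_alt n
instance (n : Int) (out : Int) : Decidable (Spec_f n out) := by unfold Spec_f; infer_instance

-- ===== CLAIM (what is proved, stated in full; the proofs are below) =====
def Claim_equal_f : Prop := ∀ (n : Int), Dom_f n → Spec_f n (f n)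

-- ===== LEMMAS AND PROOFS =====

-- steps remaining when the next subtraction is 3 (human's turn)
def G (n : Int) : Int :=
  if n ≤ 2 then 0
  else 2 * ((n - 2) / 5) + (if (n - 2) % 5 = 0 then 0 else if (n - 2) % 5 ≤ 3 then 1 else 2)

-- steps remaining when the next subtraction is 2 (computer's turn)
def H (n : Int) : Int :=
  if n ≤ 2 then 0
  else 2 * ((n - 2) / 5) + (if (n - 2) % 5 = 0 then 0 else if (n - 2) % 5 ≤ 2 then 1 else 2)

lemma G_step (n : Int) (h : n > 2) : G n = 1 + H (n - 3) := by
  unfold G H; split_ifs <;> omega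

lemma H_step (n : Int) (h : n > 2) : H n = 1 + G (n - 2) := by
  unfold G H; split_ifs <;> omega

lemma fLoop_eq (n res turn : Int) :
    fLoop n res turn = res + (if turn % 2 = 0 then G n else H n) := by
  by_cases h : n > 2
  · rw [fLoop]
    simp only [h, dite_true]
    by_cases ht : turn % 2 = 0
    · have h1 : (turn + 1) % 2 = 1 := by omega
      rw [if_pos h1, fLoop_eq (n - 3) (res + 1) (turn + 1)]
      have h2 : ¬ (turn + 1) % 2 = 0 := by omega
      rw [if_neg h2, if_pos ht, G_step n h]
      have hH : H (n - 3) = if (turn + 1) % 2 = 0 then G (n - 3) else H (n - 3) := by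
        rw [if_neg h2]
      ring
    · have h1 : ¬ (turn + 1) % 2 = 1 := by omega
      rw [if_neg h1, fLoop_eq (n - 2) (res + 1) (turn + 1)]
      have h2 : (turn + 1) % 2 = 0 := by omega
      rw [if_pos h2, if_neg ht, H_step n h]
      ring
  · rw [fLoop]
    simp only [h, dite_false]
    have : G n = 0 := by unfold G; rw [if_pos (by omega)]
    have : H n = 0 := by unfold H; rw [if_pos (by omega)]
    split_ifs <;> omega
termination_by n.toNat
decreasing_by all_goals omega

-- ===== VERDICT (by name: the statement is the Claim_ definition above) =====
theorem f_spec : Claim_equal_f := by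
  intro n _
  unfold Spec_f f f_alt
  rw [fLoop_eq]
  simp only [show (0:Int) % 2 = 0 from rfl, if_true]
  unfold G
  split_ifs <;> omega
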